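-- pv_equiv track=rewrite | github.com/pypi-data/pypi-mirror-93 | packages/lofar-obs-xml/lofar_obs_xml-2.0-py3-none-any.whl/momxml/utilities.py | exclude_conflicting_eu_stations
-- ===== SOURCE A (Python) =====
-- def exclude_conflicting_eu_stations(stations):
--     r'''
--
--     The international stations are connected to the same BlueGene
--     IONodes as the HBA1 ear in some core stations. For HBA_ONE,
--     HBA_DUAL_INNER, and HBA_DUAL mode, we need to remove either the
--     core stations, or the eu stations that conflict. This function
--     removes the conflicting eu stations.
--
--     **Parameters**
--
--     stations : list of strings
--         The station names in the observation.
--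
--     **Returns**
--
--     A list of strings containing only non-conflicting stations, from
--     which the EU stations have been removed.
--
--     **Examples**
--
--     >>> exclude_conflicting_eu_stations(['CS001', 'CS002', 'RS407'])
--     ['CS001', 'CS002', 'RS407']
--     >>> exclude_conflicting_eu_stations(['CS001', 'CS002', 'RS407', 'DE605'])
--     ['CS001', 'CS002', 'RS407', 'DE605']
--     >>> exclude_conflicting_eu_stations(['CS001', 'CS002', 'CS028', 'RS407',
--     ...                                  'DE601', 'DE605', 'UK608'])
--     ['CS001', 'CS002', 'CS028', 'RS407', 'DE605', 'UK608']
--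
--     '''
--     exclude_dict = {'DE601': 'CS001',
--                     'DE602': 'CS031',
--                     'DE603': 'CS028',
--                     'DE604': 'CS011',
--                     'DE605': 'CS401',
--                     'FR606': 'CS030',
--                     'SE607': 'CS301',
--                     'UK608': 'CS013'}
--     good_stations = []
--
--     for station in stations:
--         try:
--             if exclude_dict[station] not in stations:
--                 good_stations.append(station)
--         except KeyError:
--             good_stations.append(station)
--     return good_stations
-- ===== SOURCE B (Python) =====
-- def exclude_conflicting_eu_stations(stations):
--     exclude_dict = {'DE601': 'CS001',
--                     'DE602': 'CS031',
--                     'DE603': 'CS028',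
--                     'DE604': 'CS011',
--                     'DE605': 'CS401',
--                     'FR606': 'CS030',
--                     'SE607': 'CS301',
--                     'UK608': 'CS013'}
--     to_remove = {eu for eu, core in exclude_dict.items() if core in stations}
--     return [s for s in stations if s not in to_remove]
-- ===== Notes on version B (the rewrite author's own statement) =====
-- stated objective: simpler
-- what changed: Instead of looping over stations with a per-station dict lookup guarded by try/except KeyError, B iterates once over the fixed conflict table to build a to_remove set of EU stations whose core partner is present, then returns a single filter comprehension over stations.
import Mathlib
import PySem

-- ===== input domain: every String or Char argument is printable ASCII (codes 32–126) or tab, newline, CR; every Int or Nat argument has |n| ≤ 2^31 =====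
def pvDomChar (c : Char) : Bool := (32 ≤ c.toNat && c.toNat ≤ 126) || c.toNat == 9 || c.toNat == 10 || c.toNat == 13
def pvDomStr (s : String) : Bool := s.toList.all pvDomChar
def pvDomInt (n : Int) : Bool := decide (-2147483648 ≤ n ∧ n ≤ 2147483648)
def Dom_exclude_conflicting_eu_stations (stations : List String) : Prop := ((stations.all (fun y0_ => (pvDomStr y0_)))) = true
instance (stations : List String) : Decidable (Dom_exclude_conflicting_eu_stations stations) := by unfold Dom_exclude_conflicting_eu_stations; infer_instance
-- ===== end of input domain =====

-- B replaces A's per-station try/except dict-lookup loop by building a to_remove set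
-- from the fixed conflict table and then filtering stations in one pass (objective: simpler).


-- ===== PORT A =====
-- A's literal exclude_dict (insertion order as written)
def pvExcludeDictA : PySem.Dict String String :=
  PySem.Dict.ofList [("DE601", "CS001"), ("DE602", "CS031"), ("DE603", "CS028"),
                     ("DE604", "CS011"), ("DE605", "CS401"), ("FR606", "CS030"),
                     ("SE607", "CS301"), ("UK608", "CS013")]

-- loop over stations; exclude_dict[station] raising KeyError = get? returning none
def exclude_conflicting_eu_stations (stations : List String) : List String :=
  stations.foldl
    (fun good_stations station =>
      match pvExcludeDictA.get? station with
      | some core => if core ∈ stations then good_stations else good_stations ++ [station]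
      | none => good_stations ++ [station])
    []

-- ===== PORT B =====
-- B's exclude_dict is the same literal table; shared as pvExcludeDictA above
def pvExcludeDictB : PySem.Dict String String := pvExcludeDictA

-- to_remove = {eu for eu, core in exclude_dict.items() if core in stations}; then one filter pass
def exclude_conflicting_eu_stations_alt (stations : List String) : List String :=
  let to_remove : PySem.Set String :=
    PySem.Set.ofList (((pvExcludeDictB.items.filter (fun p => p.2 ∈ stations)).map Prod.fst))
  stations.filter (fun s => s ∉ to_remove)

-- ===== PRECONDITION & SPEC =====
def Spec_exclude_conflicting_eu_stations (stations : List String) (out : List String) : Prop := out = exclude_conflicting_eu_stations_alt stations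
instance (stations : List String) (out : List String) : Decidable (Spec_exclude_conflicting_eu_stations stations out) := by unfold Spec_exclude_conflicting_eu_stations; infer_instance

-- ===== CLAIM (what is proved, stated in full; the proofs are below) =====
def Claim_equal_exclude_conflicting_eu_stations : Prop := ∀ (stations : List String), Dom_exclude_conflicting_eu_stations stations → Spec_exclude_conflicting_eu_stations stations (exclude_conflicting_eu_stations stations)

-- ===== LEMMAS AND PROOFS =====

lemma pvKeysNodup : pvExcludeDictA.keys.Nodup := by decide

lemma pvDictsEq : pvExcludeDictB = pvExcludeDictA := rfl

-- membership in B's to_remove set characterised through A's dict lookup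
lemma mem_to_remove (stations : List String) (s : String) :
    (s ∈ PySem.Set.ofList (((pvExcludeDictB.items.filter (fun p => p.2 ∈ stations)).map Prod.fst)))
      ↔ ∃ c, pvExcludeDictA.get? s = some c ∧ c ∈ stations := by
  rw [pvDictsEq, PySem.Set.mem_ofList]
  constructor
  · intro h
    rcases List.mem_map.mp h with ⟨p, hp, hfst⟩
    rcases List.mem_filter.mp hp with ⟨hmem, hcore⟩
    refine ⟨p.2, ?_, by simpa using hcore⟩
    have : (s, p.2) ∈ pvExcludeDictA.items := by
      cases p; cases hfst; simpa using hmem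
    exact PySem.Dict.get?_of_mem_items _ this pvKeysNodup
  · rintro ⟨c, hget, hc⟩
    have hitem : (s, c) ∈ pvExcludeDictA.items := PySem.Dict.mem_items_of_get?_eq_some _ hget
    exact List.mem_map.mpr ⟨(s, c), List.mem_filter.mpr ⟨hitem, by simpa using hc⟩, rfl⟩

-- A's foldl builds init ++ filter of the kept stations
lemma pvFoldA (stations l : List String) (acc : List String) :
    l.foldl
      (fun good_stations station =>
        match pvExcludeDictA.get? station with
        | some core => if core ∈ stations then good_stations else good_stations ++ [station]
        | none => good_stations ++ [station])
      acc
    = acc ++ l.filter (fun s =>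
        match pvExcludeDictA.get? s with
        | some core => decide (core ∉ stations)
        | none => true) := by
  induction l generalizing acc with
  | nil => simp
  | cons x xs ih =>
    simp only [List.foldl_cons, List.filter_cons]
    cases h : pvExcludeDictA.get? x with
    | none => simp [ih]
    | some c =>
      by_cases hc : c ∈ stations
      · simp [hc, ih]
      · simp [hc, ih]

-- ===== VERDICT (by name: the statement is the Claim_ definition above) =====
theorem exclude_conflicting_eu_stations_spec : Claim_equal_exclude_conflicting_eu_stations := by
  intro stations _
  unfold Spec_exclude_conflicting_eu_stations exclude_conflicting_eu_stations
    exclude_conflicting_eu_stations_alt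
  rw [pvFoldA stations stations []]
  simp only [List.nil_append]
  apply List.filter_congr
  intro s _
  cases h : pvExcludeDictA.get? s with
  | none =>
    have : ¬ (s ∈ PySem.Set.ofList (((pvExcludeDictB.items.filter (fun p => p.2 ∈ stations)).map Prod.fst))) := by
      rw [mem_to_remove]
      rintro ⟨c, hget, -⟩
      simp [h] at hget
    simpa using this
  | some c =>
    by_cases hc : c ∈ stations
    · have : s ∈ PySem.Set.ofList (((pvExcludeDictB.items.filter (fun p => p.2 ∈ stations)).map Prod.fst)) :=
        (mem_to_remove stations s).mpr ⟨c, h, hc⟩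
      simp [hc, this]
    · have : ¬ (s ∈ PySem.Set.ofList (((pvExcludeDictB.items.filter (fun p => p.2 ∈ stations)).map Prod.fst))) := by
        rw [mem_to_remove]
        rintro ⟨c', hget, hc'⟩
        rw [h] at hget
        exact hc (by cases hget; exact hc')
      simp [hc, this]
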